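-- pv_equiv track=rewrite | github.com/WskThomas/projetrl | pentago/PentaGoLogic.py | _is_diagonal_winner
-- ===== SOURCE A (Python) =====
-- def _is_diagonal_winner(player_pieces, win_length):
--
--     """Checks if player_pieces contains a diagonal win."""
--
--     for i in range(len(player_pieces) - win_length + 1):
--         for j in range(len(player_pieces[0]) - win_length + 1):
--             if all(player_pieces[i + x][j + x] for x in range(win_length)):
--                 return True
--         for j in range(win_length - 1, len(player_pieces[0])):
--             if all(player_pieces[i + x][j - x] for x in range(win_length)):
--                 return True
--     return False
-- ===== SOURCE B (Python) =====
-- def _is_diagonal_winner(player_pieces, win_length):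
--     """Single-pass DP: run lengths of consecutive pieces ending in the current
--     row, per column, for the two diagonal directions."""
--     if win_length <= 0:
--         return True  # a run of nonpositive length trivially exists
--     down = {}  # column -> length of the ↘ run ending in the previous row
--     up = {}    # column -> length of the ↗ run ending in the previous row
--     for row in player_pieces:
--         new_down, new_up = {}, {}
--         for j, cell in enumerate(row):
--             if cell:
--                 d = down.get(j - 1, 0) + 1
--                 u = up.get(j + 1, 0) + 1
--                 if d >= win_length or u >= win_length:
--                     return True
--                 new_down[j] = d
--                 new_up[j] = u
--         down, up = new_down, new_up
--     return False
-- ===== Notes on version B (the rewrite author's own statement) =====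
-- stated objective: faster
-- what changed: Replaces A's triple-nested window scan (every start cell x every offset) by a single pass over the rows maintaining, per column, the lengths of the diagonal and anti-diagonal runs ending in the previous row (dynamic programming); Pre_ excludes ragged grids only when 1 <= win_length <= number of rows (there A indexes every row with column bounds taken from row 0, so it raises IndexError or accidentally ignores cells) and the empty grid with win_length <= 0 (A raises IndexError there).
-- outside the precondition, e.g. on _is_diagonal_winner([[True], [True, True]], 2): A returns False, B returns True
import Mathlib
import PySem

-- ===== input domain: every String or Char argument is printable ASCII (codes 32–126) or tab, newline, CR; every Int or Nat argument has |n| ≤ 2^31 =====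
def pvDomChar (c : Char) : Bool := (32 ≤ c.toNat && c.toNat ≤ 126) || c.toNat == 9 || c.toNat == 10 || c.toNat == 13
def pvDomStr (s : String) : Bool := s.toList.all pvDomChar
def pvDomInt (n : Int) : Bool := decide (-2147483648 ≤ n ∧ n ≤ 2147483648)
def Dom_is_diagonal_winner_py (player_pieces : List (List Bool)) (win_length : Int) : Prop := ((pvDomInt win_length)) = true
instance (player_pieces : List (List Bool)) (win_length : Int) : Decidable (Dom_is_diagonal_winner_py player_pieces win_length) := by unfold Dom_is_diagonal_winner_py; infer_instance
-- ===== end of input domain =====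

-- B replaces A's triple-nested window scan by a single-pass per-column DP over the rows (asymptotically faster).


-- ===== PORT A =====
-- player_pieces[0] (Python: IndexError on []; here defaulted to [] — those inputs are outside Pre_)
def pvRow0Len (pp : List (List Bool)) : Int :=
  (((PySem.List.pyGet? pp 0).getD []).length : Int)

-- player_pieces[i][j] (out-of-range indices default to false/[]; inside Pre_ every access A makes is in range)
def pvCellA (pp : List (List Bool)) (i j : Int) : Bool :=
  ((PySem.List.pyGet? ((PySem.List.pyGet? pp i).getD []) j).getD false)

-- 'for v in range(a, b): if f(v): return True' as structural recursion with early return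
def pvAnyRangeGo (f : Int -> Bool) : Nat -> Int -> Bool
  | 0, _ => false
  | n + 1, i => if f i then true else pvAnyRangeGo f n (i + 1)

def pvAnyRange (a b : Int) (f : Int -> Bool) : Bool := pvAnyRangeGo f (b - a).toNat a

def is_diagonal_winner_py (player_pieces : List (List Bool)) (win_length : Int) : Bool :=
  pvAnyRange 0 ((player_pieces.length : Int) - win_length + 1) (fun i =>
    if pvAnyRange 0 (pvRow0Len player_pieces - win_length + 1) (fun j =>
        (PySem.List.pyRange 0 win_length 1).all (fun x =>
          pvCellA player_pieces (i + x) (j + x))) then true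
    else pvAnyRange (win_length - 1) (pvRow0Len player_pieces) (fun j =>
      (PySem.List.pyRange 0 win_length 1).all (fun x =>
        pvCellA player_pieces (i + x) (j - x))))

-- ===== PORT B =====
-- inner loop of Source B: one row; `none` = win found (early return True)
def pvCellLoop (w : Int) (down up : PySem.Dict Int Int) :
    List (Int × Bool) → PySem.Dict Int Int → PySem.Dict Int Int →
    Option (PySem.Dict Int Int × PySem.Dict Int Int)
  | [], nd, nu => some (nd, nu)
  | (j, cell) :: rest, nd, nu =>
    if cell then
      let d := down.getD (j - 1) 0 + 1
      let u := up.getD (j + 1) 0 + 1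
      if w ≤ d || w ≤ u then none
      else pvCellLoop w down up rest (nd.insert j d) (nu.insert j u)
    else pvCellLoop w down up rest nd nu

-- outer loop of Source B over the rows
def pvRowLoop (w : Int) (down up : PySem.Dict Int Int) : List (List Bool) → Bool
  | [] => false
  | row :: rows =>
    match pvCellLoop w down up (PySem.List.enumerate row) PySem.Dict.empty PySem.Dict.empty with
    | none => true
    | some (nd, nu) => pvRowLoop w nd nu rows

def is_diagonal_winner_py_alt (player_pieces : List (List Bool)) (win_length : Int) : Bool :=
  if win_length ≤ 0 then true
  else pvRowLoop win_length PySem.Dict.empty PySem.Dict.empty player_pieces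

-- ===== PRECONDITION & SPEC =====
-- Pre_ excludes ragged grids (rows of differing length) when 1 ≤ win_length ≤ number of rows —
-- there A indexes every row with column bounds taken from row 0, so it raises IndexError or
-- accidentally ignores cells — and the empty grid with win_length ≤ 0, where `player_pieces[0]`
-- raises IndexError.  (For win_length ≤ 0 or win_length > number of rows, A never indexes a
-- row beyond its bounds, so ragged grids are admitted there.)
def Pre_is_diagonal_winner_py (player_pieces : List (List Bool)) (win_length : Int) : Prop :=
  (player_pieces = [] → 1 ≤ win_length) ∧
  ((∀ r ∈ player_pieces, r.length = (player_pieces.headD []).length) ∨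
    (player_pieces.length : Int) < win_length ∨ win_length ≤ 0)
instance (player_pieces : List (List Bool)) (win_length : Int) : Decidable (Pre_is_diagonal_winner_py player_pieces win_length) := by unfold Pre_is_diagonal_winner_py; infer_instance

def pvWitness_is_diagonal_winner_py : List (List Bool) × Int :=
  ([[true, false], [false, true]], 2)

def Spec_is_diagonal_winner_py (player_pieces : List (List Bool)) (win_length : Int) (out : Bool) : Prop := out = is_diagonal_winner_py_alt player_pieces win_length
instance (player_pieces : List (List Bool)) (win_length : Int) (out : Bool) : Decidable (Spec_is_diagonal_winner_py player_pieces win_length out) := by unfold Spec_is_diagonal_winner_py; infer_instance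

-- ===== CLAIM (what is proved, stated in full; the proofs are below) =====
def Claim_equal_is_diagonal_winner_py : Prop := ∀ (player_pieces : List (List Bool)) (win_length : Int), Dom_is_diagonal_winner_py player_pieces win_length → Pre_is_diagonal_winner_py player_pieces win_length → Spec_is_diagonal_winner_py player_pieces win_length (is_diagonal_winner_py player_pieces win_length)

-- ===== LEMMAS AND PROOFS =====

-- cell (r, j) of the grid, false when out of range (proof-side view of both programs)
def pvCB (pp : List (List Bool)) (r : Nat) (j : Int) : Bool :=
  if j < 0 then false else (pp.getD r []).getD j.toNat false

-- length of the ↘ run ending at row r-1, column j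
def pvD (pp : List (List Bool)) : Nat → Int → Int
  | 0, _ => 0
  | r + 1, j => if pvCB pp r j then pvD pp r (j - 1) + 1 else 0

-- length of the ↗ run ending at row r-1, column j
def pvU (pp : List (List Bool)) : Nat → Int → Int
  | 0, _ => 0
  | r + 1, j => if pvCB pp r j then pvU pp r (j + 1) + 1 else 0

-- B triggers at (r, j)
def pvTrig (pp : List (List Bool)) (w : Int) (r : Nat) (j : Int) : Prop :=
  pvCB pp r j = true ∧ (w ≤ pvD pp (r + 1) j ∨ w ≤ pvU pp (r + 1) j)


theorem pvCB_nonneg (pp : List (List Bool)) (r : Nat) (j : Int) (h : pvCB pp r j = true) :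
    0 ≤ j := by
  unfold pvCB at h
  by_contra hneg
  rw [if_pos (by omega)] at h
  exact Bool.false_ne_true h

theorem pvCB_lt_col (pp : List (List Bool)) (r : Nat) (j : Int) (h : pvCB pp r j = true) :
    0 ≤ j ∧ j < ((pp.getD r []).length : Int) := by
  have h0 := pvCB_nonneg pp r j h
  refine ⟨h0, ?_⟩
  unfold pvCB at h
  rw [if_neg (by omega)] at h
  by_contra hge
  have hlen : (pp.getD r []).length ≤ j.toNat := by omega
  rw [List.getD_eq_getElem?_getD, List.getElem?_eq_none hlen] at h
  exact Bool.false_ne_true h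

theorem pvCellLoop_none_iff (w : Int) (down up : PySem.Dict Int Int) :
    ∀ (cells : List (Int × Bool)) (nd nu : PySem.Dict Int Int),
      pvCellLoop w down up cells nd nu = none ↔
      ∃ p ∈ cells, p.2 = true ∧
        (w ≤ down.getD (p.1 - 1) 0 + 1 ∨ w ≤ up.getD (p.1 + 1) 0 + 1) := by
  intro cells
  induction cells with
  | nil => intro nd nu; simp [pvCellLoop]
  | cons p rest ih =>
    intro nd nu
    obtain ⟨j, cell⟩ := p
    cases cell with
    | false =>
      rw [show pvCellLoop w down up ((j, false) :: rest) nd nu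
            = pvCellLoop w down up rest nd nu by simp [pvCellLoop]]
      rw [ih nd nu]
      simp
    | true =>
      by_cases h : w ≤ down.getD (j - 1) 0 + 1 ∨ w ≤ up.getD (j + 1) 0 + 1
      · rw [show pvCellLoop w down up ((j, true) :: rest) nd nu = none by
          have hb : (decide (w ≤ down.getD (j - 1) 0 + 1)
              || decide (w ≤ up.getD (j + 1) 0 + 1)) = true := by
            rcases h with h | h <;> simp [h]
          simp [pvCellLoop, hb]]
        simp only [true_iff]
        exact ⟨(j, true), List.mem_cons_self, rfl, h⟩
      · rw [show pvCellLoop w down up ((j, true) :: rest) nd nu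
            = pvCellLoop w down up rest
                (nd.insert j (down.getD (j - 1) 0 + 1))
                (nu.insert j (up.getD (j + 1) 0 + 1)) by
          have hb : (decide (w ≤ down.getD (j - 1) 0 + 1)
              || decide (w ≤ up.getD (j + 1) 0 + 1)) = false := by
            push_neg at h
            simp [h.1, h.2]
          simp [pvCellLoop, hb]]
        rw [ih]
        constructor
        · rintro ⟨q, hq, hq2, hq3⟩
          exact ⟨q, List.mem_cons_of_mem _ hq, hq2, hq3⟩
        · rintro ⟨q, hq, hq2, hq3⟩
          rcases List.mem_cons.mp hq with rfl | hq'
          · exact absurd hq3 h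
          · exact ⟨q, hq', hq2, hq3⟩

theorem pvCellLoop_some_getD (w : Int) (down up : PySem.Dict Int Int) :
    ∀ (cells : List (Int × Bool)) (nd nu nd' nu' : PySem.Dict Int Int),
      cells.Pairwise (fun p q => p.1 < q.1) →
      pvCellLoop w down up cells nd nu = some (nd', nu') →
      ∀ j : Int,
        nd'.getD j 0 = (if (j, true) ∈ cells then down.getD (j - 1) 0 + 1 else nd.getD j 0) ∧
        nu'.getD j 0 = (if (j, true) ∈ cells then up.getD (j + 1) 0 + 1 else nu.getD j 0) := by
  intro cells
  induction cells with
  | nil =>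
    intro nd nu nd' nu' _ h j
    simp only [pvCellLoop, Option.some.injEq, Prod.mk.injEq] at h
    simp [← h.1, ← h.2]
  | cons p rest ih =>
    intro nd nu nd' nu' hpw h j
    obtain ⟨k, cell⟩ := p
    rw [List.pairwise_cons] at hpw
    cases cell with
    | false =>
      rw [show pvCellLoop w down up ((k, false) :: rest) nd nu
            = pvCellLoop w down up rest nd nu by simp [pvCellLoop]] at h
      have := ih nd nu nd' nu' hpw.2 h j
      have hmem : ((j, true) ∈ (k, false) :: rest) ↔ ((j, true) ∈ rest) := by
        simp
      simp only [hmem]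
      exact this
    | true =>
      by_cases hw2 : w ≤ down.getD (k - 1) 0 + 1 ∨ w ≤ up.getD (k + 1) 0 + 1
      · exfalso
        rw [show pvCellLoop w down up ((k, true) :: rest) nd nu = none by
          have hb : (decide (w ≤ down.getD (k - 1) 0 + 1)
              || decide (w ≤ up.getD (k + 1) 0 + 1)) = true := by
            rcases hw2 with h' | h' <;> simp [h']
          simp [pvCellLoop, hb]] at h
        simp at h
      · rw [show pvCellLoop w down up ((k, true) :: rest) nd nu
            = pvCellLoop w down up rest
                (nd.insert k (down.getD (k - 1) 0 + 1))
                (nu.insert k (up.getD (k + 1) 0 + 1)) by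
          have hb : (decide (w ≤ down.getD (k - 1) 0 + 1)
              || decide (w ≤ up.getD (k + 1) 0 + 1)) = false := by
            push_neg at hw2
            simp [hw2.1, hw2.2]
          simp [pvCellLoop, hb]] at h
        have hnotin : (k, true) ∉ rest := by
          intro hmem
          exact absurd (hpw.1 (k, true) hmem) (lt_irrefl k)
        have := ih _ _ nd' nu' hpw.2 h j
        by_cases hjk : j = k
        · subst hjk
          rw [if_neg hnotin, if_neg hnotin] at this
          rw [PySem.Dict.getD_insert_self, PySem.Dict.getD_insert_self] at this
          rw [if_pos (List.mem_cons_self), if_pos (List.mem_cons_self)]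
          exact this
        · have hmem : ((j, true) ∈ (k, true) :: rest) ↔ ((j, true) ∈ rest) := by
            simp [hjk]
          simp only [hmem]
          rcases this with ⟨h1, h2⟩
          by_cases hr : (j, true) ∈ rest
          · simp only [if_pos hr] at h1 h2 ⊢
            exact ⟨h1, h2⟩
          · simp only [if_neg hr] at h1 h2 ⊢
            rw [PySem.Dict.getD_insert_of_ne _ _ _ hjk] at h1
            rw [PySem.Dict.getD_insert_of_ne _ _ _ hjk] at h2
            exact ⟨h1, h2⟩

theorem pv_enum_cB (pp : List (List Bool)) (k : Nat) (j : Int) :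
    ((j, true) ∈ PySem.List.enumerate (pp.getD k [])) ↔ pvCB pp k j = true := by
  rw [PySem.List.mem_enumerate_iff]
  unfold pvCB
  constructor
  · rintro ⟨m, hm, hp⟩
    have hj : j = (m : Int) := by
      have := congrArg Prod.fst hp
      simpa using this
    have hv : (pp.getD k [])[m] = true := by
      have := congrArg Prod.snd hp
      simpa using this.symm
    subst hj
    rw [if_neg (by omega)]
    rw [Int.toNat_natCast]
    rw [List.getD_eq_getElem?_getD, List.getElem?_eq_getElem hm]
    simpa using hv
  · intro h
    have hj0 : 0 ≤ j := by
      by_contra hneg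
      rw [if_pos (by omega)] at h
      exact Bool.false_ne_true h
    rw [if_neg (by omega)] at h
    have hlt : j.toNat < (pp.getD k []).length := by
      by_contra hge
      rw [List.getD_eq_getElem?_getD, List.getElem?_eq_none (by omega)] at h
      exact Bool.false_ne_true h
    refine ⟨j.toNat, hlt, ?_⟩
    rw [List.getD_eq_getElem?_getD, List.getElem?_eq_getElem hlt] at h
    simp only [Option.getD_some] at h
    rw [h]
    simp [Prod.ext_iff]
    omega

theorem pvRowLoop_iff (pp : List (List Bool)) (w : Int) :
    ∀ (n k : Nat), pp.length = k + n →
    ∀ (down up : PySem.Dict Int Int),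
      (∀ j : Int, down.getD j 0 = pvD pp k j) →
      (∀ j : Int, up.getD j 0 = pvU pp k j) →
      (pvRowLoop w down up (pp.drop k) = true ↔
        ∃ r : Nat, k ≤ r ∧ r < pp.length ∧ ∃ j : Int, pvTrig pp w r j) := by
  intro n
  induction n with
  | zero =>
    intro k hk down up _ _
    rw [show pp.drop k = [] from List.drop_eq_nil_of_le (by omega)]
    simp only [pvRowLoop, Bool.false_eq_true, false_iff]
    rintro ⟨r, h1, h2, _⟩
    omega
  | succ n ih =>
    intro k hk down up hd hu
    have hklt : k < pp.length := by omega
    have hdrop : pp.drop k = pp[k] :: pp.drop (k + 1) := List.drop_eq_getElem_cons hklt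
    have hrow : pp[k] = pp.getD k [] := by
      rw [List.getD_eq_getElem?_getD, List.getElem?_eq_getElem hklt]
      simp
    rw [hdrop, hrow]
    -- translation of the none-condition into triggers at row k
    have htrans : ∀ nd0 nu0 : PySem.Dict Int Int,
        (pvCellLoop w down up (PySem.List.enumerate (pp.getD k [])) nd0 nu0 = none)
        ↔ ∃ j : Int, pvTrig pp w k j := by
      intro nd0 nu0
      rw [pvCellLoop_none_iff]
      constructor
      · rintro ⟨p, hp, hp2, hp3⟩
        obtain ⟨j, b⟩ := p
        simp only at hp2 hp3
        subst hp2
        have hcb : pvCB pp k j = true := (pv_enum_cB pp k j).mp hp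
        refine ⟨j, hcb, ?_⟩
        rw [hd, hu] at hp3
        have hDs : pvD pp (k + 1) j = pvD pp k (j - 1) + 1 := by
          simp [pvD, hcb]
        have hUs : pvU pp (k + 1) j = pvU pp k (j + 1) + 1 := by
          simp [pvU, hcb]
        rw [hDs, hUs]
        exact hp3
      · rintro ⟨j, hcb, hor⟩
        refine ⟨(j, true), (pv_enum_cB pp k j).mpr hcb, rfl, ?_⟩
        rw [hd, hu]
        have hDs : pvD pp (k + 1) j = pvD pp k (j - 1) + 1 := by
          simp [pvD, hcb]
        have hUs : pvU pp (k + 1) j = pvU pp k (j + 1) + 1 := by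
          simp [pvU, hcb]
        rw [hDs, hUs] at hor
        exact hor
    cases hE : pvCellLoop w down up (PySem.List.enumerate (pp.getD k []))
        PySem.Dict.empty PySem.Dict.empty with
    | none =>
      rw [show pvRowLoop w down up
            ((pp.getD k []) :: pp.drop (k + 1)) = true by
        simp only [pvRowLoop]
        rw [hE]]
      simp only [true_iff]
      obtain ⟨j, hj⟩ := (htrans _ _).mp hE
      exact ⟨k, le_refl k, hklt, j, hj⟩
    | some st =>
      obtain ⟨nd, nu⟩ := st
      rw [show pvRowLoop w down up ((pp.getD k []) :: pp.drop (k + 1))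
            = pvRowLoop w nd nu (pp.drop (k + 1)) by
        simp only [pvRowLoop]
        rw [hE]]
      have hst := pvCellLoop_some_getD w down up _ PySem.Dict.empty PySem.Dict.empty nd nu
        (PySem.List.pairwise_lt_enumerate _ _) hE
      have hnd : ∀ j : Int, nd.getD j 0 = pvD pp (k + 1) j := by
        intro j
        have := (hst j).1
        simp only [pv_enum_cB pp k j] at this
        rw [this]
        by_cases hcb : pvCB pp k j = true
        · rw [if_pos hcb, hd]
          simp [pvD, hcb]
        · rw [if_neg hcb]
          simp only [PySem.Dict.getD_empty]
          simp [pvD, hcb]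
      have hnu : ∀ j : Int, nu.getD j 0 = pvU pp (k + 1) j := by
        intro j
        have := (hst j).2
        simp only [pv_enum_cB pp k j] at this
        rw [this]
        by_cases hcb : pvCB pp k j = true
        · rw [if_pos hcb, hu]
          simp [pvU, hcb]
        · rw [if_neg hcb]
          simp only [PySem.Dict.getD_empty]
          simp [pvU, hcb]
      rw [ih (k + 1) (by omega) nd nu hnd hnu]
      have hnone : ¬ ∃ j : Int, pvTrig pp w k j := by
        intro hex
        have := (htrans PySem.Dict.empty PySem.Dict.empty).mpr hex
        rw [hE] at this
        simp at this
      constructor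
      · rintro ⟨r, h1, h2, hj⟩
        exact ⟨r, by omega, h2, hj⟩
      · rintro ⟨r, h1, h2, hj⟩
        rcases Nat.eq_or_lt_of_le h1 with rfl | hlt
        · exact absurd hj hnone
        · exact ⟨r, by omega, h2, hj⟩

theorem pvD_bounds (pp : List (List Bool)) :
    ∀ (r : Nat) (j : Int), 0 ≤ pvD pp r j ∧ pvD pp r j ≤ (r : Int) ∧
      (pvD pp r j = 0 ∨ (0 ≤ j ∧ pvD pp r j ≤ j + 1)) := by
  intro r
  induction r with
  | zero => intro j; simp [pvD]
  | succ r ih =>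
    intro j
    by_cases h : pvCB pp r j = true
    · have hj := pvCB_nonneg pp r j h
      have H := ih (j - 1)
      rw [show pvD pp (r + 1) j = pvD pp r (j - 1) + 1 by simp [pvD, h]]
      push_cast
      omega
    · rw [show pvD pp (r + 1) j = 0 by simp [pvD, h]]
      refine ⟨le_refl 0, by positivity, Or.inl rfl⟩

theorem pvU_bounds (pp : List (List Bool)) :
    ∀ (r : Nat) (j : Int), 0 ≤ pvU pp r j ∧ pvU pp r j ≤ (r : Int) := by
  intro r
  induction r with
  | zero => intro j; simp [pvU]
  | succ r ih =>
    intro j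
    by_cases h : pvCB pp r j = true
    · have H := ih (j + 1)
      rw [show pvU pp (r + 1) j = pvU pp r (j + 1) + 1 by simp [pvU, h]]
      push_cast
      omega
    · rw [show pvU pp (r + 1) j = 0 by simp [pvU, h]]
      exact ⟨le_refl 0, by positivity⟩

theorem pvD_window (pp : List (List Bool)) :
    ∀ (r : Nat) (j : Int) (x : Nat), (x : Int) < pvD pp (r + 1) j →
      pvCB pp (r - x) (j - x) = true := by
  intro r
  induction r with
  | zero =>
    intro j x hx
    by_cases h : pvCB pp 0 j = true
    · rw [show pvD pp 1 j = pvD pp 0 (j - 1) + 1 by simp [pvD, h]] at hx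
      rw [show pvD pp 0 (j - 1) = 0 from rfl] at hx
      have hx0 : x = 0 := by omega
      subst hx0
      simpa using h
    · rw [show pvD pp 1 j = 0 by simp [pvD, h]] at hx
      omega
  | succ r ih =>
    intro j x hx
    by_cases h : pvCB pp (r + 1) j = true
    · rw [show pvD pp (r + 2) j = pvD pp (r + 1) (j - 1) + 1 by simp [pvD, h]] at hx
      cases x with
      | zero => simpa using h
      | succ x' =>
        have hx' : (x' : Int) < pvD pp (r + 1) (j - 1) := by push_cast at hx ⊢; omega
        have := ih (j - 1) x' hx'
        rw [show r + 1 - (x' + 1) = r - x' by omega]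
        rw [show j - ((x' + 1 : Nat) : Int) = j - 1 - (x' : Int) by push_cast; ring]
        exact this
    · rw [show pvD pp (r + 2) j = 0 by simp [pvD, h]] at hx
      omega

theorem pvU_window (pp : List (List Bool)) :
    ∀ (r : Nat) (j : Int) (x : Nat), (x : Int) < pvU pp (r + 1) j →
      pvCB pp (r - x) (j + x) = true := by
  intro r
  induction r with
  | zero =>
    intro j x hx
    by_cases h : pvCB pp 0 j = true
    · rw [show pvU pp 1 j = pvU pp 0 (j + 1) + 1 by simp [pvU, h]] at hx
      rw [show pvU pp 0 (j + 1) = 0 from rfl] at hx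
      have hx0 : x = 0 := by omega
      subst hx0
      simpa using h
    · rw [show pvU pp 1 j = 0 by simp [pvU, h]] at hx
      omega
  | succ r ih =>
    intro j x hx
    by_cases h : pvCB pp (r + 1) j = true
    · rw [show pvU pp (r + 2) j = pvU pp (r + 1) (j + 1) + 1 by simp [pvU, h]] at hx
      cases x with
      | zero => simpa using h
      | succ x' =>
        have hx' : (x' : Int) < pvU pp (r + 1) (j + 1) := by push_cast at hx ⊢; omega
        have := ih (j + 1) x' hx'
        rw [show r + 1 - (x' + 1) = r - x' by omega]
        rw [show j + ((x' + 1 : Nat) : Int) = j + 1 + (x' : Int) by push_cast; ring]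
        exact this
    · rw [show pvU pp (r + 2) j = 0 by simp [pvU, h]] at hx
      omega

theorem pvD_of_window (pp : List (List Bool)) :
    ∀ (t i : Nat) (j : Int),
      (∀ x : Nat, x < t → pvCB pp (i + x) (j + x) = true) →
      (t : Int) ≤ pvD pp (i + t) (j + t - 1) := by
  intro t
  induction t with
  | zero =>
    intro i j _
    have := pvD_bounds pp (i + 0) (j + 0 - 1)
    simpa using this.1
  | succ t ih =>
    intro i j hwin
    have hcb : pvCB pp (i + t) (j + t) = true := by
      have := hwin t (by omega)
      exact this
    have hstep : pvD pp (i + (t + 1)) (j + (t + 1 : Nat) - 1)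
        = pvD pp (i + t) (j + t - 1) + 1 := by
      rw [show i + (t + 1) = (i + t) + 1 by omega]
      rw [show j + ((t + 1 : Nat) : Int) - 1 = j + (t : Int) by push_cast; ring]
      simp [pvD, hcb]
    rw [hstep]
    have := ih i j (fun x hx => hwin x (by omega))
    push_cast
    omega

theorem pvU_of_window (pp : List (List Bool)) :
    ∀ (t i : Nat) (j : Int),
      (∀ x : Nat, x < t → pvCB pp (i + x) (j - x) = true) →
      (t : Int) ≤ pvU pp (i + t) (j - t + 1) := by
  intro t
  induction t with
  | zero =>
    intro i j _
    have := pvU_bounds pp (i + 0) (j - 0 + 1)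
    simpa using this.1
  | succ t ih =>
    intro i j hwin
    have hcb : pvCB pp (i + t) (j - t) = true := by
      have := hwin t (by omega)
      exact this
    have hstep : pvU pp (i + (t + 1)) (j - ((t + 1 : Nat) : Int) + 1)
        = pvU pp (i + t) (j - t + 1) + 1 := by
      rw [show i + (t + 1) = (i + t) + 1 by omega]
      rw [show j - ((t + 1 : Nat) : Int) + 1 = j - (t : Int) by push_cast; ring]
      simp [pvU, hcb]
    rw [hstep]
    have := ih i j (fun x hx => hwin x (by omega))
    push_cast
    omega

theorem pvCellA_eq_pvCB (pp : List (List Bool)) (i j : Int) (hi : 0 ≤ i) (hj : 0 ≤ j) :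
    pvCellA pp i j = pvCB pp i.toNat j := by
  unfold pvCellA pvCB
  rw [PySem.List.pyGet?_of_nonneg pp hi, if_neg (show ¬ j < 0 by omega)]
  rw [PySem.List.pyGet?_of_nonneg _ hj]
  simp [List.getD_eq_getElem?_getD]

theorem pvRect (pp : List (List Bool))
    (hrect : ∀ r ∈ pp, r.length = (pp.headD []).length) (r : Nat) (hr : r < pp.length) :
    ((pp.getD r []).length : Int) = pvRow0Len pp := by
  have hmem : pp.getD r [] ∈ pp := by
    rw [List.getD_eq_getElem?_getD, List.getElem?_eq_getElem hr]
    exact List.getElem_mem hr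
  have h1 := hrect _ hmem
  have hne : pp ≠ [] := by
    intro h
    subst h
    simp at hr
  unfold pvRow0Len
  rw [PySem.List.pyGet?_zero]
  cases pp with
  | nil => exact absurd rfl hne
  | cons a l =>
    simp only [List.getElem?_cons_zero, Option.getD_some]
    have h1x : ((a :: l).getD r []).length = a.length := by simpa using h1
    exact_mod_cast h1x

theorem pvB_iff (pp : List (List Bool)) (w : Int) (hw : 1 ≤ w) :
    is_diagonal_winner_py_alt pp w = true ↔
      ∃ r : Nat, r < pp.length ∧ ∃ j : Int, pvTrig pp w r j := by
  unfold is_diagonal_winner_py_alt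
  rw [if_neg (by omega)]
  have hiff := pvRowLoop_iff pp w pp.length 0 (by omega) PySem.Dict.empty PySem.Dict.empty
    (fun j => by simp [pvD]) (fun j => by simp [pvU])
  rw [List.drop_zero] at hiff
  rw [hiff]
  constructor
  · rintro ⟨r, _, h2, hj⟩; exact ⟨r, h2, hj⟩
  · rintro ⟨r, h2, hj⟩; exact ⟨r, Nat.zero_le r, h2, hj⟩

theorem pv_if_or (x y : Bool) : (if x then true else y) = (x || y) := by
  cases x <;> simp

theorem pvAnyRangeGo_iff (f : Int -> Bool) :
    ∀ (n : Nat) (i : Int), pvAnyRangeGo f n i = true ↔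
      ∃ k : Nat, k < n ∧ f (i + (k : Int)) = true := by
  intro n
  induction n with
  | zero => intro i; simp [pvAnyRangeGo]
  | succ n ih =>
    intro i
    by_cases hf : f i = true
    · rw [show pvAnyRangeGo f (n + 1) i = true by simp [pvAnyRangeGo, hf]]
      simp only [true_iff]
      exact ⟨0, by omega, by simpa using hf⟩
    · rw [show pvAnyRangeGo f (n + 1) i = pvAnyRangeGo f n (i + 1) by
        simp [pvAnyRangeGo, hf]]
      rw [ih (i + 1)]
      constructor
      · rintro ⟨k, hk, hfk⟩
        refine ⟨k + 1, by omega, ?_⟩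
        rwa [show i + ((k + 1 : Nat) : Int) = i + 1 + (k : Int) by push_cast; ring]
      · rintro ⟨k, hk, hfk⟩
        cases k with
        | zero => exact absurd (by simpa using hfk) hf
        | succ k =>
          refine ⟨k, by omega, ?_⟩
          rwa [show i + 1 + (k : Int) = i + ((k + 1 : Nat) : Int) by push_cast; ring]

theorem pvAnyRange_iff (a b : Int) (f : Int -> Bool) :
    pvAnyRange a b f = true ↔ ∃ x : Int, a ≤ x ∧ x < b ∧ f x = true := by
  unfold pvAnyRange
  rw [pvAnyRangeGo_iff]
  constructor
  · rintro ⟨k, hk, hfk⟩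
    exact ⟨a + (k : Int), by omega, by omega, hfk⟩
  · rintro ⟨x, hx0, hx1, hfx⟩
    refine ⟨(x - a).toNat, by omega, ?_⟩
    rwa [show a + (((x - a).toNat : Nat) : Int) = x by omega]

theorem pvA_iff (pp : List (List Bool)) (w : Int) :
    is_diagonal_winner_py pp w = true ↔
      ∃ i : Int, (0 ≤ i ∧ i < (pp.length : Int) - w + 1) ∧
        ((∃ j : Int, (0 ≤ j ∧ j < pvRow0Len pp - w + 1) ∧
            ∀ x : Int, 0 ≤ x → x < w → pvCellA pp (i + x) (j + x) = true) ∨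
         (∃ j : Int, (w - 1 ≤ j ∧ j < pvRow0Len pp) ∧
            ∀ x : Int, 0 ≤ x → x < w → pvCellA pp (i + x) (j - x) = true)) := by
  unfold is_diagonal_winner_py
  rw [pvAnyRange_iff]
  constructor
  · rintro ⟨i, hi0, hi1, hbody⟩
    rw [pv_if_or, Bool.or_eq_true] at hbody
    refine ⟨i, ⟨hi0, hi1⟩, ?_⟩
    rcases hbody with h | h <;> rw [pvAnyRange_iff] at h
    · obtain ⟨j, hj0, hj1, hall⟩ := h
      exact Or.inl ⟨j, ⟨hj0, hj1⟩, fun x hx0 hx1 =>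
        List.all_eq_true.mp hall x (PySem.List.mem_pyRange_one.mpr ⟨hx0, hx1⟩)⟩
    · obtain ⟨j, hj0, hj1, hall⟩ := h
      exact Or.inr ⟨j, ⟨hj0, hj1⟩, fun x hx0 hx1 =>
        List.all_eq_true.mp hall x (PySem.List.mem_pyRange_one.mpr ⟨hx0, hx1⟩)⟩
  · rintro ⟨i, ⟨hi0, hi1⟩, hcase⟩
    refine ⟨i, hi0, hi1, ?_⟩
    rw [pv_if_or, Bool.or_eq_true]
    rcases hcase with ⟨j, ⟨hj0, hj1⟩, hwin⟩ | ⟨j, ⟨hj0, hj1⟩, hwin⟩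
    · refine Or.inl ((pvAnyRange_iff _ _ _).mpr ⟨j, hj0, hj1, List.all_eq_true.mpr ?_⟩)
      intro x hx
      obtain ⟨hx0, hx1⟩ := PySem.List.mem_pyRange_one.mp hx
      exact hwin x hx0 hx1
    · refine Or.inr ((pvAnyRange_iff _ _ _).mpr ⟨j, hj0, hj1, List.all_eq_true.mpr ?_⟩)
      intro x hx
      obtain ⟨hx0, hx1⟩ := PySem.List.mem_pyRange_one.mp hx
      exact hwin x hx0 hx1

theorem pv_AtoB (pp : List (List Bool)) (w : Int) (hw : 1 ≤ w)
    (hA : is_diagonal_winner_py pp w = true) :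
    is_diagonal_winner_py_alt pp w = true := by
  rw [pvA_iff] at hA
  rw [pvB_iff pp w hw]
  obtain ⟨i, ⟨hi0, hi1⟩, hcase⟩ := hA
  set n := w.toNat with hn
  have hwn : (n : Int) = w := Int.toNat_of_nonneg (by omega)
  have hn1 : 1 ≤ n := by omega
  rcases hcase with ⟨j, ⟨hj0, hj1⟩, hwin⟩ | ⟨j, ⟨hj0, hj1⟩, hwin⟩
  · -- ↘ window at (i, j)
    have hwin' : ∀ x : Nat, x < n → pvCB pp (i.toNat + x) (j + x) = true := by
      intro x hx
      have h1 := hwin (x : Int) (by omega) (by omega)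
      rw [pvCellA_eq_pvCB pp _ _ (by omega) (by omega)] at h1
      rwa [show (i + (x : Int)).toNat = i.toNat + x by omega] at h1
    have hD := pvD_of_window pp n i.toNat j hwin'
    refine ⟨i.toNat + n - 1, by omega, j + (n : Int) - 1, ?_, Or.inl ?_⟩
    · have := hwin' (n - 1) (by omega)
      rwa [show i.toNat + (n - 1) = i.toNat + n - 1 by omega,
        show j + ((n - 1 : Nat) : Int) = j + (n : Int) - 1 by push_cast [hn1]; ring] at this
    · rw [show i.toNat + n - 1 + 1 = i.toNat + n by omega]
      omega
  · -- ↗ window at (i, j)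
    have hwin' : ∀ x : Nat, x < n → pvCB pp (i.toNat + x) (j - x) = true := by
      intro x hx
      have h1 := hwin (x : Int) (by omega) (by omega)
      rw [pvCellA_eq_pvCB pp _ _ (by omega) (by omega)] at h1
      rwa [show (i + (x : Int)).toNat = i.toNat + x by omega] at h1
    have hU := pvU_of_window pp n i.toNat j hwin'
    refine ⟨i.toNat + n - 1, by omega, j - (n : Int) + 1, ?_, Or.inr ?_⟩
    · have := hwin' (n - 1) (by omega)
      rwa [show i.toNat + (n - 1) = i.toNat + n - 1 by omega,
        show j - ((n - 1 : Nat) : Int) = j - (n : Int) + 1 by push_cast [hn1]; ring] at this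
    · rw [show i.toNat + n - 1 + 1 = i.toNat + n by omega]
      omega

theorem pv_BtoA (pp : List (List Bool)) (w : Int) (hw : 1 ≤ w)
    (hrect : ∀ r ∈ pp, r.length = (pp.headD []).length)
    (hB : is_diagonal_winner_py_alt pp w = true) :
    is_diagonal_winner_py pp w = true := by
  rw [pvB_iff pp w hw] at hB
  rw [pvA_iff]
  obtain ⟨r, hr, j, hcb, hor⟩ := hB
  set n := w.toNat with hn
  have hwn : (n : Int) = w := Int.toNat_of_nonneg (by omega)
  have hn1 : 1 ≤ n := by omega
  have hjcol := pvCB_lt_col pp r j hcb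
  have hcols := pvRect pp hrect r hr
  rcases hor with hD | hU
  · -- ↘ run of length ≥ w ending at (r, j)
    have hband := pvD_bounds pp (r + 1) j
    have hwr : w ≤ (r : Int) + 1 := by
      have := hband.2.1; push_cast at this; omega
    have hwj : w ≤ j + 1 := by
      rcases hband.2.2 with h0 | h1
      · omega
      · omega
    have hnr : n ≤ r + 1 := by omega
    refine ⟨((r + 1 - n : Nat) : Int), ⟨by omega, by omega⟩,
      Or.inl ⟨j - (n : Int) + 1, ⟨by omega, by omega⟩, ?_⟩⟩
    intro x hx0 hx1
    have hxN : x.toNat < n := by omega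
    have hcell := pvD_window pp r j (n - 1 - x.toNat) (by omega)
    rw [pvCellA_eq_pvCB pp _ _ (by omega) (by omega)]
    rw [show ((((r + 1 - n : Nat) : Int)) + x).toNat = r - (n - 1 - x.toNat) by omega]
    rw [show j - (n : Int) + 1 + x = j - ((n - 1 - x.toNat : Nat) : Int) by omega]
    exact hcell
  · -- ↗ run of length ≥ w ending at (r, j)
    have hband := pvU_bounds pp (r + 1) j
    have hwr : w ≤ (r : Int) + 1 := by
      have := hband.2; push_cast at this; omega
    have hnr : n ≤ r + 1 := by omega
    -- topmost cell of the run bounds the column from above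
    have htop := pvU_window pp r j (n - 1) (by omega)
    have htopcol := pvCB_lt_col pp (r - (n - 1)) (j + ((n - 1 : Nat) : Int)) htop
    have hcols' := pvRect pp hrect (r - (n - 1)) (by omega)
    refine ⟨((r + 1 - n : Nat) : Int), ⟨by omega, by omega⟩,
      Or.inr ⟨j + (n : Int) - 1, ⟨by omega, ?_⟩, ?_⟩⟩
    · have h2 := htopcol.2
      rw [hcols'] at h2
      omega
    · intro x hx0 hx1
      have hxN : x.toNat < n := by omega
      have hcell := pvU_window pp r j (n - 1 - x.toNat) (by omega)
      rw [pvCellA_eq_pvCB pp _ _ (by omega) (by omega)]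
      rw [show ((((r + 1 - n : Nat) : Int)) + x).toNat = r - (n - 1 - x.toNat) by omega]
      rw [show j + (n : Int) - 1 - x = j + ((n - 1 - x.toNat : Nat) : Int) by omega]
      exact hcell

-- ===== VERDICT (by name: the statement is the Claim_ definition above) =====
theorem is_diagonal_winner_py_spec : Claim_equal_is_diagonal_winner_py := by
  intro pp w _ hpre
  unfold Spec_is_diagonal_winner_py
  by_cases hw : w ≤ 0
  · have hB : is_diagonal_winner_py_alt pp w = true := by
      simp [is_diagonal_winner_py_alt, hw]
    have hA : is_diagonal_winner_py pp w = true := by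
      rw [pvA_iff]
      have hlen : (0 : Int) ≤ (pp.length : Int) := by positivity
      have hcols : (0 : Int) ≤ pvRow0Len pp := by
        unfold pvRow0Len; positivity
      exact ⟨0, ⟨le_refl 0, by omega⟩,
        Or.inl ⟨0, ⟨le_refl 0, by omega⟩, fun x hx1 hx2 => by omega⟩⟩
    rw [hA, hB]
  · push_neg at hw
    have hw1 : 1 ≤ w := by omega
    by_cases hbig : (pp.length : Int) < w
    · -- the window does not fit vertically: both sides are false
      have hAB : (is_diagonal_winner_py pp w = true) ↔
          (is_diagonal_winner_py_alt pp w = true) := by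
        rw [pvA_iff, pvB_iff pp w hw1]
        constructor
        · rintro ⟨i, ⟨hi0, hi1⟩, -⟩
          exact absurd hi1 (by omega)
        · rintro ⟨r, hr, j, -, hor⟩
          exfalso
          have hDb := (pvD_bounds pp (r + 1) j).2.1
          have hUb := (pvU_bounds pp (r + 1) j).2
          rcases hor with h | h <;> omega
      cases hA : is_diagonal_winner_py pp w with
      | true => exact (hAB.mp hA).symm
      | false =>
        cases hB : is_diagonal_winner_py_alt pp w with
        | true => rw [hAB.mpr hB] at hA; exact absurd hA (by simp)
        | false => rfl
    · have hrect : ∀ r ∈ pp, r.length = (pp.headD []).length := by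
        rcases hpre.2 with h | h | h
        · exact h
        · exact absurd h hbig
        · omega
      cases hA : is_diagonal_winner_py pp w with
      | true => exact (pv_AtoB pp w hw1 hA).symm
      | false =>
        cases hB : is_diagonal_winner_py_alt pp w with
        | true => rw [pv_BtoA pp w hw1 hrect hB] at hA; exact absurd hA (by simp)
        | false => rfl
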